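-- pv_equiv track=rewrite | github.com/jacksonhu/localbrisk | backend/agent_engine/engine/agent_context_loader.py | _build_skill_tool_name
-- ===== SOURCE A (Python) =====
-- def _build_skill_tool_name(skill_name: str) -> str:
--     """Build a stable SDK tool name for one native skill."""
--     normalized_chars = [char.lower() if char.isalnum() else "_" for char in skill_name.strip()]
--     normalized = "".join(normalized_chars).strip("_")
--     while "__" in normalized:
--         normalized = normalized.replace("__", "_")
--     if not normalized:
--         normalized = "native_skill"
--     if normalized[0].isdigit():
--         normalized = f"skill_{normalized}"
--     return f"skill_{normalized}"
-- ===== SOURCE B (Python) =====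
-- def _build_skill_tool_name(skill_name: str) -> str:
--     """Build a stable SDK tool name for one native skill (single forward pass)."""
--     buf = []
--     sep = False
--     for ch in skill_name.strip():
--         if ch.isalnum():
--             buf.append(ch.lower())
--             sep = False
--         elif buf and not sep:
--             buf.append("_")
--             sep = True
--     if buf and buf[-1] == "_":
--         buf.pop()
--     normalized = "".join(buf)
--     if not normalized:
--         normalized = "native_skill"
--     if normalized[0].isdigit():
--         normalized = f"skill_{normalized}"
--     return f"skill_{normalized}"
-- ===== Notes on version B (the rewrite author's own statement) =====
-- stated objective: simpler
-- what changed: Replaces A's pipeline (map each char to its lowered form or an underscore, strip edge underscores, then repeatedly collapse double underscores until none remain) with one forward pass that appends lowered alnum chars and at most one separator per non-alnum run, plus a single trailing-separator drop; the final guards are unchanged.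
import Mathlib
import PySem

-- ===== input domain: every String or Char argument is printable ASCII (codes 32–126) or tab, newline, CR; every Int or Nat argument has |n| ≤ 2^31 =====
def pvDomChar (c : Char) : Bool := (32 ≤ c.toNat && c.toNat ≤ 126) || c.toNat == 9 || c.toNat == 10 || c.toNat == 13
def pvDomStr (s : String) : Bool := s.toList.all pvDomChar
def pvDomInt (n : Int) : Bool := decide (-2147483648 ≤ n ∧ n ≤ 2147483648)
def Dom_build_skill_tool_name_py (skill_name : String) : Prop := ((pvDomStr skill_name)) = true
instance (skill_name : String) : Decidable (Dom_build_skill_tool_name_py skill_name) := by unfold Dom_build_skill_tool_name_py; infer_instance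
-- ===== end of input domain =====

-- B replaces A's map-to-underscores / strip('_') / repeated replace('__','_') pipeline by one
-- forward pass with a separator flag (objective: simpler); same final guards, same return value.

-- ===== PORT A =====
-- proof-level model of one pass of normalized.replace("__", "_"); needed (with the lemmas
-- below) by loopA's decreasing_by, so it stays above the port
def ddRep : List Char → List Char
  | [] => []
  | [c] => [c]
  | c :: d :: t => if c = '_' ∧ d = '_' then '_' :: ddRep t else c :: ddRep (d :: t)

lemma ddRep_length_le (l : List Char) : (ddRep l).length ≤ l.length := by
  fun_induction ddRep l <;> simp_all <;> omega

lemma replaceGo_eq (fuel : Nat) (l acc : List Char) (h : l.length ≤ fuel) :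
    PySem.Chars.replace.go ['_','_'] ['_'] fuel l acc = acc.reverse ++ ddRep l := by
  induction fuel generalizing l acc with
  | zero =>
    have : l = [] := List.eq_nil_of_length_eq_zero (Nat.le_zero.mp h)
    subst this; simp [PySem.Chars.replace.go, ddRep]
  | succ n ih =>
    match l with
    | [] => simp [PySem.Chars.replace.go, ddRep]
    | [c] =>
      rw [PySem.Chars.replace.go]
      have hp : List.isPrefixOf ['_','_'] [c] = false := by simp [List.isPrefixOf]
      rw [hp]
      simp only [Bool.false_eq_true, if_false]
      rw [ih [] (c :: acc) (by simp)]
      simp [ddRep]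
    | c :: d :: t =>
      rw [PySem.Chars.replace.go]
      by_cases hp : c = '_' ∧ d = '_'
      · obtain ⟨rfl, rfl⟩ := hp
        rw [show List.isPrefixOf ['_','_'] ('_' :: '_' :: t) = true by simp [List.isPrefixOf]]
        simp only [if_true]
        rw [show List.drop (['_','_'] : List Char).length ('_' :: '_' :: t) = t by simp]
        rw [ih t (['_'].reverse ++ acc) (by simp at h ⊢; omega)]
        simp [ddRep]
      · rw [show List.isPrefixOf ['_','_'] (c :: d :: t) = false by
          simp [List.isPrefixOf]; intro h1 h2; exact hp ⟨h1.symm, h2.symm⟩]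
        simp only [Bool.false_eq_true, if_false]
        rw [ih (d :: t) (c :: acc) (by simp at h ⊢; omega)]
        rw [show ddRep (c :: d :: t) = c :: ddRep (d :: t) by rw [ddRep]; simp [hp]]
        simp

lemma replace_dd_eq (l : List Char) :
    PySem.Chars.replace l ['_','_'] ['_'] = ddRep l := by
  rw [PySem.Chars.replace]
  simp only [List.isEmpty_iff, if_neg (by simp : ¬(['_','_'] : List Char) = [])]
  simpa using replaceGo_eq l.length l [] le_rfl

lemma ddRep_length_lt (l : List Char) (h : PySem.Chars.isIn ['_','_'] l = true) :
    (ddRep l).length < l.length := by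
  rw [PySem.Chars.isIn_iff_infix] at h
  induction l with
  | nil => simp at h
  | cons c t ih =>
    cases t with
    | nil =>
      exfalso
      rcases h with ⟨s, r, hsr⟩
      apply_fun List.length at hsr
      simp at hsr; omega
    | cons d t' =>
      by_cases hcd : c = '_' ∧ d = '_'
      · obtain ⟨rfl, rfl⟩ := hcd
        rw [show ddRep ('_' :: '_' :: t') = '_' :: ddRep t' by rw [ddRep]; simp]
        have := ddRep_length_le t'
        simp; omega
      · have hinf : ['_','_'] <:+: (d :: t') := by
          rcases List.infix_cons_iff.mp h with hpre | hinf
          · exfalso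
            rcases hpre with ⟨r, hr⟩
            simp at hr
            exact hcd ⟨hr.1.symm, hr.2.1.symm⟩
          · exact hinf
        have := ih hinf
        rw [show ddRep (c :: d :: t') = c :: ddRep (d :: t') by rw [ddRep]; simp [hcd]]
        simp at this ⊢; omega

-- the 'while "__" in normalized: normalized = normalized.replace("__", "_")' loop of A
def loopA (l : List Char) : List Char :=
  if h : PySem.Chars.isIn ['_','_'] l = true then
    loopA (PySem.Chars.replace l ['_','_'] ['_'])
  else l
termination_by l.length
decreasing_by rw [replace_dd_eq]; exact ddRep_length_lt l h

def build_skill_tool_name_py (skill_name : String) : String :=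
  -- [char.lower() if char.isalnum() else "_" for char in skill_name.strip()]
  let normalized_chars :=
    (PySem.Chars.strip skill_name.toList).map
      (fun c => if PySem.Chars.isalnum c then PySem.Chars.lowerChar c else '_')
  -- "".join(...).strip("_")
  let normalized := PySem.Chars.stripChars normalized_chars ['_']
  let normalized := loopA normalized
  let normalized := if normalized = [] then "native_skill".toList else normalized
  -- normalized[0].isdigit(): the index never fails (normalized is nonempty here)
  let normalized :=
    if ((PySem.List.pyGet? normalized 0).map PySem.Chars.isdigit).getD false
    then "skill_".toList ++ normalized else normalized
  String.mk ("skill_".toList ++ normalized)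

-- ===== PORT B =====
def stepB (st : List Char × Bool) (ch : Char) : List Char × Bool :=
  if PySem.Chars.isalnum ch then (st.1 ++ [PySem.Chars.lowerChar ch], false)
  else if !st.1.isEmpty && !st.2 then (st.1 ++ ['_'], true)
  else st

def build_skill_tool_name_py_alt (skill_name : String) : String :=
  let st := (PySem.Chars.strip skill_name.toList).foldl stepB ([], false)
  -- if buf and buf[-1] == "_": buf.pop()
  let buf := if !st.1.isEmpty && (st.1.getLast? == some '_') then st.1.dropLast else st.1
  let normalized := buf
  let normalized := if normalized = [] then "native_skill".toList else normalized
  let normalized :=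
    if ((PySem.List.pyGet? normalized 0).map PySem.Chars.isdigit).getD false
    then "skill_".toList ++ normalized else normalized
  String.mk ("skill_".toList ++ normalized)

-- ===== PRECONDITION & SPEC =====
def Spec_build_skill_tool_name_py (skill_name : String) (out : String) : Prop := out = build_skill_tool_name_py_alt skill_name
instance (skill_name : String) (out : String) : Decidable (Spec_build_skill_tool_name_py skill_name out) := by unfold Spec_build_skill_tool_name_py; infer_instance

-- ===== CLAIM (what is proved, stated in full; the proofs are below) =====
def Claim_equal_build_skill_tool_name_py : Prop := ∀ (skill_name : String), Dom_build_skill_tool_name_py skill_name → Spec_build_skill_tool_name_py skill_name (build_skill_tool_name_py skill_name)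

-- ===== LEMMAS AND PROOFS =====

-- squeeze runs of '_' to a single '_' (the fixpoint of the replace loop)
def sqU : List Char → List Char
  | [] => []
  | [c] => [c]
  | c :: d :: t => if c = '_' ∧ d = '_' then sqU (d :: t) else c :: sqU (d :: t)
termination_by l => l.length
decreasing_by all_goals simp

-- drop a trailing run of '_'
def myRstrip : List Char → List Char
  | [] => []
  | c :: t => if c == '_' && t.all (· == '_') then [] else c :: myRstrip t

-- drop one trailing '_' (B's final buf.pop())
def popU : List Char → List Char
  | [] => []
  | [c] => if c = '_' then [] else [c]
  | c :: d :: t => c :: popU (d :: t)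

-- the state machine B's fold computes, read off the remaining input
def ES (sep : Bool) : List Char → List Char × Bool
  | [] => ([], sep)
  | c :: t =>
    if PySem.Chars.isalnum c then (PySem.Chars.lowerChar c :: (ES false t).1, (ES false t).2)
    else if sep then ES true t
    else ('_' :: (ES true t).1, (ES true t).2)

def ZL : List Char → List Char × Bool
  | [] => ([], false)
  | c :: t =>
    if PySem.Chars.isalnum c then (PySem.Chars.lowerChar c :: (ES false t).1, (ES false t).2)
    else ZL t

def fN (c : Char) : Char := if PySem.Chars.isalnum c then PySem.Chars.lowerChar c else '_'

lemma lowerChar_ne (c : Char) (h : PySem.Chars.isalnum c = true) : PySem.Chars.lowerChar c ≠ '_' := by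
  intro hc
  rw [PySem.Chars.lowerChar] at hc
  by_cases hu : PySem.Chars.isupper c = true
  · rw [if_pos hu] at hc
    have hb : 65 ≤ c.toNat ∧ c.toNat ≤ 90 := by
      simpa [PySem.Chars.isupper, Char.le_def] using hu
    have h1 : (Char.ofNat (c.toNat + 32)).toNat = c.toNat + 32 := by
      rw [Char.toNat_ofNat, if_pos (Or.inl (by omega))]
    rw [hc] at h1
    have h2 : ('_' : Char).toNat = 95 := by decide
    omega
  · rw [if_neg hu] at hc
    subst hc
    exact absurd h (by decide)

lemma sq_dd (t : List Char) : sqU ('_' :: '_' :: t) = sqU ('_' :: t) := by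
  rw [sqU]; simp

lemma sq_cons_ne (c : Char) (l : List Char) (hc : c ≠ '_') : sqU (c :: l) = c :: sqU l := by
  cases l with
  | nil => simp [sqU]
  | cons d t => rw [sqU]; simp [hc]

lemma ddRep_cons_of_ne (c : Char) (u : List Char) (hc : c ≠ '_') :
    ddRep (c :: u) = c :: ddRep u := by
  cases u with
  | nil => rw [ddRep, ddRep]
  | cons d t => rw [ddRep]; simp [hc]

lemma myRstrip_cons_ne (c : Char) (l : List Char) (hc : c ≠ '_') :
    myRstrip (c :: l) = c :: myRstrip l := by
  rw [myRstrip]; simp [hc]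

lemma myRstrip_cons_not_all (c : Char) (l : List Char) (h : ¬ l.all (· == '_') = true) :
    myRstrip (c :: l) = c :: myRstrip l := by
  rw [myRstrip]; rw [if_neg]; simp_all

lemma popU_cons_ne (c : Char) (l : List Char) (hc : c ≠ '_') : popU (c :: l) = c :: popU l := by
  cases l with
  | nil => rw [popU, popU]; simp [hc]
  | cons d t => rw [popU]

lemma popU_cons_nonempty (c : Char) (l : List Char) (h : l ≠ []) : popU (c :: l) = c :: popU l := by
  cases l with
  | nil => exact absurd rfl h
  | cons d t => rw [popU]

lemma popU_eq (l : List Char) :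
    popU l = if !l.isEmpty && (l.getLast? == some '_') then l.dropLast else l := by
  induction l with
  | nil => rw [popU]; simp
  | cons c t ih =>
    cases t with
    | nil => by_cases hc : c = '_' <;> simp [popU, hc]
    | cons d t' =>
      rw [popU_cons_nonempty c _ (by simp), ih]
      by_cases hl : ((d :: t').getLast? == some '_') = true
      · simp only [hl]
        simp [List.getLast?_cons_cons, hl, List.dropLast_cons_of_ne_nil]
      · simp only [Bool.not_eq_true] at hl
        simp [List.getLast?_cons_cons, hl]

-- one replace pass does not change the squeezed value (paired with a '_'-prefixed form)
lemma sq_ddRep_pair (l : List Char) :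
    sqU (ddRep l) = sqU l ∧ sqU ('_' :: ddRep l) = sqU ('_' :: l) := by
  fun_induction ddRep l with
  | case1 => exact ⟨rfl, rfl⟩
  | case2 c => exact ⟨rfl, rfl⟩
  | case3 c d t hcd ih =>
    obtain ⟨rfl, rfl⟩ := hcd
    constructor
    · rw [sq_dd]; exact ih.2
    · rw [sq_dd (ddRep t), sq_dd ('_' :: t), sq_dd t]; exact ih.2
  | case4 c d t hcd ih =>
    by_cases hc : c = '_'
    · subst hc
      have hd : d ≠ '_' := fun hd => hcd ⟨rfl, hd⟩
      have hdd : ddRep (d :: t) = d :: ddRep t := ddRep_cons_of_ne d t hd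
      have key : sqU ('_' :: ddRep (d :: t)) = sqU ('_' :: d :: t) := by
        rw [hdd]
        rw [show sqU ('_' :: d :: ddRep t) = '_' :: sqU (d :: ddRep t) by
          rw [sqU]; simp [hd]]
        rw [show sqU ('_' :: d :: t) = '_' :: sqU (d :: t) by rw [sqU]; simp [hd]]
        rw [← hdd, ih.1]
      refine ⟨key, ?_⟩
      rw [sq_dd (ddRep (d :: t)), sq_dd (d :: t)]; exact key
    · constructor
      · rw [sq_cons_ne c _ hc, sq_cons_ne c _ hc, ih.1]
      · rw [show sqU ('_' :: c :: ddRep (d :: t)) = '_' :: sqU (c :: ddRep (d :: t)) by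
          rw [sqU]; simp [hc]]
        rw [show sqU ('_' :: c :: d :: t) = '_' :: sqU (c :: d :: t) by
          rw [sqU]; simp [hc]]
        rw [sq_cons_ne c _ hc, sq_cons_ne c _ hc, ih.1]

lemma noDD_sq (l : List Char) (h : PySem.Chars.isIn ['_','_'] l = false) : sqU l = l := by
  have h' : ¬ (['_','_'] <:+: l) := by
    rw [← PySem.Chars.isIn_iff_infix]; simp [h]
  clear h
  fun_induction sqU l with
  | case1 => rfl
  | case2 c => rfl
  | case3 c d t hcd ih =>
    obtain ⟨rfl, rfl⟩ := hcd
    exact absurd (⟨[], t, by simp⟩ : ['_','_'] <:+: '_' :: '_' :: t) h'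
  | case4 c d t hcd ih =>
    rw [ih (fun hi => h' (List.infix_cons hi))]

lemma loopA_eq_sq (l : List Char) : loopA l = sqU l := by
  fun_induction loopA l with
  | case1 l h ih =>
    rw [ih, replace_dd_eq, (sq_ddRep_pair l).1]
  | case2 l h =>
    rw [noDD_sq l (by simpa using h)]

lemma foldE (cs : List Char) : ∀ (b : List Char) (sep : Bool), b ≠ [] →
    cs.foldl stepB (b, sep) = (b ++ (ES sep cs).1, (ES sep cs).2) := by
  induction cs with
  | nil => intro b sep hb; simp [ES]
  | cons c t ih =>
    intro b sep hb
    rw [List.foldl_cons, ES]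
    by_cases hc : PySem.Chars.isalnum c = true
    · rw [show stepB (b, sep) c = (b ++ [PySem.Chars.lowerChar c], false) by rw [stepB]; simp [hc]]
      rw [ih _ false (by simp)]
      simp [hc]
    · rw [show stepB (b, sep) c = if sep then (b, sep) else (b ++ ['_'], true) by
        rw [stepB]; cases sep <;> simp [hc, hb]]
      cases sep with
      | true => rw [if_pos rfl, ih b true hb]; simp [hc]
      | false =>
        rw [if_neg (by simp), ih _ true (by simp)]
        simp [hc]

lemma foldZ (cs : List Char) : cs.foldl stepB ([], false) = ZL cs := by
  induction cs with
  | nil => rw [ZL]; simp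
  | cons c t ih =>
    rw [List.foldl_cons, ZL]
    by_cases hc : PySem.Chars.isalnum c = true
    · rw [show stepB ([], false) c = ([PySem.Chars.lowerChar c], false) by rw [stepB]; simp [hc]]
      rw [foldE t [PySem.Chars.lowerChar c] false (by simp)]
      simp [hc]
    · rw [show stepB ([], false) c = ([], false) by rw [stepB]; simp [hc]]
      rw [ih]; simp [hc]

lemma myRstrip_rev (l : List Char) :
    (List.dropWhile (· == '_') l.reverse).reverse = myRstrip l := by
  induction l with
  | nil => rw [myRstrip]; simp
  | cons c t ih =>
    rw [show (c :: t).reverse = t.reverse ++ [c] from by simp]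
    rw [List.dropWhile_append]
    by_cases hall : t.all (· == '_') = true
    · have hnil : List.dropWhile (· == '_') t.reverse = [] := by
        rw [List.dropWhile_eq_nil_iff]
        intro x hx
        exact (List.all_eq_true.mp hall) x (List.mem_reverse.mp hx)
      rw [hnil]
      simp only [List.isEmpty_nil, if_true]
      have hmt : myRstrip t = [] := by rw [← ih, hnil]; simp
      rw [myRstrip]
      by_cases hc : c = '_'
      · simp [hc, hall]
      · simp [hc, hall, hmt]
    · have hne : (List.dropWhile (· == '_') t.reverse).isEmpty = false := by
        rw [List.isEmpty_eq_false_iff, Ne, List.dropWhile_eq_nil_iff]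
        intro hx
        apply hall
        rw [List.all_eq_true]
        exact fun x hxm => hx x (List.mem_reverse.mpr hxm)
      rw [hne]
      simp only [Bool.false_eq_true, if_false]
      rw [List.reverse_append]
      simp only [List.reverse_cons, List.reverse_nil, List.nil_append, List.singleton_append]
      rw [ih, myRstrip_cons_not_all c t hall]

lemma stripChars_eq (ms : List Char) :
    PySem.Chars.stripChars ms ['_'] = myRstrip (List.dropWhile (· == '_') ms) := by
  rw [PySem.Chars.stripChars]
  have hp : (fun c => (['_'] : List Char).contains c) = (fun c : Char => c == '_') := by
    funext c; by_cases h : c = '_' <;> simp [h]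
  simp only [hp]
  exact myRstrip_rev _

lemma R2 (l : List Char) : sqU (myRstrip ('_' :: '_' :: l)) = sqU (myRstrip ('_' :: l)) := by
  by_cases hall : l.all (· == '_') = true
  · rw [show myRstrip ('_' :: '_' :: l) = [] by rw [myRstrip]; simp [hall]]
    rw [show myRstrip ('_' :: l) = [] by rw [myRstrip]; simp [hall]]
  · rw [myRstrip_cons_not_all '_' ('_' :: l) (by simp [hall]), myRstrip_cons_not_all '_' l hall]
    exact sq_dd _

lemma bridge (t : List Char) :
    popU ((ES false t).1) = sqU (myRstrip (t.map fN)) ∧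
    popU ('_' :: (ES true t).1) = sqU (myRstrip ('_' :: t.map fN)) ∧
    popU ((ZL t).1) = sqU (myRstrip (List.dropWhile (· == '_') (t.map fN))) := by
  induction t with
  | nil =>
    refine ⟨?_, ?_, ?_⟩ <;> simp [ES, ZL, popU, myRstrip, sqU]
  | cons c t ih =>
    obtain ⟨ihE, ihS, ihZ⟩ := ih
    by_cases hc : PySem.Chars.isalnum c = true
    · have hlc : PySem.Chars.lowerChar c ≠ '_' := lowerChar_ne c hc
      have hfc : fN c = PySem.Chars.lowerChar c := by rw [fN, if_pos hc]
      have hmap : (c :: t).map fN = PySem.Chars.lowerChar c :: t.map fN := by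
        simp [hfc]
      have hE : (ES false (c :: t)).1 = PySem.Chars.lowerChar c :: (ES false t).1 := by
        rw [ES]; simp [hc]
      have hS : (ES true (c :: t)).1 = PySem.Chars.lowerChar c :: (ES false t).1 := by
        rw [ES]; simp [hc]
      have hcommon : popU (PySem.Chars.lowerChar c :: (ES false t).1) =
          sqU (myRstrip (PySem.Chars.lowerChar c :: t.map fN)) := by
        rw [popU_cons_ne _ _ hlc, myRstrip_cons_ne _ _ hlc, sq_cons_ne _ _ hlc, ihE]
      refine ⟨?_, ?_, ?_⟩
      · rw [hE, hmap]; exact hcommon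
      · rw [hS, hmap]
        rw [popU_cons_nonempty '_' _ (by simp), popU_cons_ne _ _ hlc, ihE]
        rw [myRstrip_cons_not_all '_' _ (by simp [hlc])]
        rw [myRstrip_cons_ne _ _ hlc]
        rw [show sqU ('_' :: PySem.Chars.lowerChar c :: myRstrip (t.map fN)) =
            '_' :: PySem.Chars.lowerChar c :: sqU (myRstrip (t.map fN)) by
          rw [sqU]
          simp [hlc]
          rw [sq_cons_ne _ _ hlc]]
      · rw [show (ZL (c :: t)).1 = PySem.Chars.lowerChar c :: (ES false t).1 by rw [ZL]; simp [hc]]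
        rw [hmap, List.dropWhile_cons_of_neg (by simp [hlc])]
        exact hcommon
    · have hfc : fN c = '_' := by rw [fN, if_neg hc]
      have hmap : (c :: t).map fN = '_' :: t.map fN := by simp [hfc]
      refine ⟨?_, ?_, ?_⟩
      · rw [show (ES false (c :: t)).1 = '_' :: (ES true t).1 by rw [ES]; simp [hc]]
        rw [hmap]; exact ihS
      · rw [show (ES true (c :: t)).1 = (ES true t).1 by rw [ES]; simp [hc]]
        rw [hmap]
        rw [R2]; exact ihS
      · rw [show (ZL (c :: t)).1 = (ZL t).1 by rw [ZL]; simp [hc]]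
        rw [hmap, List.dropWhile_cons_of_pos (by simp)]
        exact ihZ

-- ===== VERDICT (by name: the statement is the Claim_ definition above) =====
theorem build_skill_tool_name_py_spec : Claim_equal_build_skill_tool_name_py := by
  unfold Claim_equal_build_skill_tool_name_py
  intro s _
  unfold Spec_build_skill_tool_name_py
  simp only [build_skill_tool_name_py, build_skill_tool_name_py_alt]
  rw [stripChars_eq, loopA_eq_sq]
  rw [show (fun c => if PySem.Chars.isalnum c then PySem.Chars.lowerChar c else '_') = fN from rfl]
  rw [← (bridge (PySem.Chars.strip s.toList)).2.2]
  rw [popU_eq, foldZ]
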